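-- pv_equiv track=rewrite | github.com/yojiyama7/python_competitive_programming | agc/agc_041/a_.py | solve
-- ===== SOURCE A (Python) =====
-- def solve(n, a, b):
--     m = b-a
--     if m%2:
--         return min(
--             a     + solve(b-a, 1, b-a),
--             n-b+1 + solve(n, a+(n-b+1), n),
--         )
--     else:
--         return m//2
-- ===== SOURCE B (Python) =====
-- def solve(n, a, b):
--     m = b - a
--     base = m // 2
--     if m % 2 == 0:
--         return base
--     return base + min(a, n - b + 1)
-- ===== Notes on version B (the rewrite author's own statement) =====
-- stated objective: simpler
-- what changed: Replaced the two-branch recursion by a flat closed form: each recursive call hits the even base case immediately and collapses to (m-1)//2, so the odd case is m//2 + min(a, n-b+1) with no self-call and no min over two recursive sums.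
import Mathlib
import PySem

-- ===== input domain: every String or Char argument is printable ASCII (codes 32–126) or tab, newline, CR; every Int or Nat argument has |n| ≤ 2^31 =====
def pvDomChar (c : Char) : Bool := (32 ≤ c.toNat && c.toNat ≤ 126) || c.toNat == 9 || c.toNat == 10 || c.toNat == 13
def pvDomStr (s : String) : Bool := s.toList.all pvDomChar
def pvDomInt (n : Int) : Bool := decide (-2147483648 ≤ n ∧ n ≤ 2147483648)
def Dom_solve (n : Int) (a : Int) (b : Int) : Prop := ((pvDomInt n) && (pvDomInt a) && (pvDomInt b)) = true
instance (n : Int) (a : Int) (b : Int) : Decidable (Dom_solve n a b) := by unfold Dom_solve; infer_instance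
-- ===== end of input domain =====

-- ===== PORT A =====
-- helper: unfold floor mod/div at the positive divisor 2 (cited by the port's decreasing_by)
theorem pv_mod2 (x : Int) : PySem.Int.mod x 2 = x % 2 :=
  PySem.Int.mod_eq_emod_of_pos (b := 2) (by norm_num)

-- B replaces A's recursion by a flat closed form (each recursive call of A hits the even base case immediately); return-value equivalence proved below.
def solve (n : Int) (a : Int) (b : Int) : Int :=
  let m := b - a
  if PySem.Int.mod m 2 ≠ 0 then
    min (a + solve (b - a) 1 (b - a))
        (n - b + 1 + solve n (a + (n - b + 1)) n)
  else
    PySem.Int.floordiv m 2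
termination_by (PySem.Int.mod (b - a) 2).toNat
decreasing_by
  · simp only [pv_mod2] at *; omega
  · simp only [pv_mod2] at *; omega

-- ===== PORT B =====
def solve_alt (n : Int) (a : Int) (b : Int) : Int :=
  let m := b - a
  let base := PySem.Int.floordiv m 2
  if PySem.Int.mod m 2 = 0 then base else base + min a (n - b + 1)

-- ===== PRECONDITION & SPEC =====
def Spec_solve (n : Int) (a : Int) (b : Int) (out : Int) : Prop := out = solve_alt n a b
instance (n : Int) (a : Int) (b : Int) (out : Int) : Decidable (Spec_solve n a b out) := by unfold Spec_solve; infer_instance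

-- ===== CLAIM (what is proved, stated in full; the proofs are below) =====
def Claim_equal_solve : Prop := ∀ (n : Int) (a : Int) (b : Int), Dom_solve n a b → Spec_solve n a b (solve n a b)

-- ===== LEMMAS AND PROOFS =====
theorem pv_fd2 (x : Int) : PySem.Int.floordiv x 2 = x / 2 :=
  PySem.Int.floordiv_eq_ediv_of_pos (b := 2) (by norm_num)


-- ===== VERDICT (by name: the statement is the Claim_ definition above) =====
theorem solve_spec : Claim_equal_solve := by
  intro n a b _
  unfold Spec_solve solve_alt
  rw [solve]
  simp only [pv_mod2, pv_fd2]
  by_cases h : (b - a) % 2 = 0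
  · rw [if_neg (by omega : ¬ (b - a) % 2 ≠ 0), if_pos h]
  · rw [if_pos (by omega : (b - a) % 2 ≠ 0)]
    rw [solve]
    simp only [pv_mod2, pv_fd2]
    rw [if_neg (by omega : ¬ (b - a - 1) % 2 ≠ 0)]
    rw [solve]
    simp only [pv_mod2, pv_fd2]
    rw [if_neg (by omega : ¬ (n - (a + (n - b + 1))) % 2 ≠ 0)]
    rw [if_neg h]
    omega
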